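-- pv_equiv track=rewrite | github.com/YLab-UChicago/dftryout | arm_gen/utils.py | generate_inout_sequence
-- ===== SOURCE A (Python) =====
-- def generate_inout_sequence(filter_width,filter_height,stride,num_cache_byrow):
--
--     unroll_num = filter_width - stride
--     sequence_list = []
--     num_cache_count = 0
--     for un in range(unroll_num):
--         this_unroll_iter = []
--         for fh in range(filter_height):
--             this_height_iter = []
--             if num_cache_byrow[fh] <= stride:
--                 for nc in range(num_cache_byrow[fh]):
--                     this_height_iter.append(nc + fh*(filter_width-stride))
--             else:
--                 for nc in range(num_cache_byrow[fh]):
--                     this_height_iter.append((un + nc)%num_cache_byrow[fh]+ fh*(filter_width-stride))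
--             this_unroll_iter.append(this_height_iter)
--         sequence_list.append(this_unroll_iter)
--     return sequence_list
-- ===== SOURCE B (Python) =====
-- def generate_inout_sequence(filter_width, filter_height, stride, num_cache_byrow):
--     unroll_num = filter_width - stride
--     if unroll_num <= 0:
--         return []
--     # Precompute, once per filter row, its cache count and its base index list.
--     rows = []
--     for fh in range(filter_height):
--         n = num_cache_byrow[fh]
--         off = fh * (filter_width - stride)
--         rows.append((n, [off + k for k in range(n)]))
--     # Each unroll step is a fresh copy of the base or a left rotation of it.
--     out = []
--     for un in range(unroll_num):
--         this = []
--         for n, base in rows: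
--             if n <= stride or n <= 0:
--                 row = list(base)
--             else:
--                 r = un % n
--                 row = base[r:] + base[:r]
--             this.append(row)
--         out.append(this)
--     return out
-- ===== Notes on version B (the rewrite author's own statement) =====
-- stated objective: alternative
-- what changed: B precomputes each filter row's (count, base index list) pair once and builds every unroll step by copying the base or left-rotating it with two slices, instead of recomputing every element with a per-element modulo in A's innermost loop.
import Mathlib
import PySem

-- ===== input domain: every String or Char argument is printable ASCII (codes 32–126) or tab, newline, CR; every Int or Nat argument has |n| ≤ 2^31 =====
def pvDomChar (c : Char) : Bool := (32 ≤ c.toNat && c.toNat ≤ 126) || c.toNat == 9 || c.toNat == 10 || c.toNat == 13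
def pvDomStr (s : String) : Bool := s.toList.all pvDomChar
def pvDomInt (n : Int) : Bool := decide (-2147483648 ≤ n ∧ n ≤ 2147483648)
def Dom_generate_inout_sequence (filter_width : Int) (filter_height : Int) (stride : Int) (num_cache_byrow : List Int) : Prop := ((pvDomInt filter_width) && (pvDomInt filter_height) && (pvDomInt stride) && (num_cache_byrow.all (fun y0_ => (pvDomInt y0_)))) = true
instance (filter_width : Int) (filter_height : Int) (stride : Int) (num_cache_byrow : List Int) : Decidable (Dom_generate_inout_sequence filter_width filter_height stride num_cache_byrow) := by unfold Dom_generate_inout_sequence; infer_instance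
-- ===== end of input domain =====

-- B replaces A's innermost per-element modulo loop by a per-row precomputed base list that each
-- unroll step either copies or left-rotates with two slices (alternative decomposition, same cost).

-- ===== PORT A =====
-- Literal port of A: nested for-loops as foldl over pyRange, appending to the accumulator.
-- num_cache_byrow[fh] is ported as pyGetD (default 0): exact under Pre_, which puts every
-- index the loops touch in range (outside Pre_ the Python raises IndexError).
def generate_inout_sequence (filter_width : Int) (filter_height : Int) (stride : Int) (num_cache_byrow : List Int) : List (List (List Int)) :=
  let unroll_num := filter_width - stride
  (PySem.List.pyRange 0 unroll_num 1).foldl (fun sequence_list un =>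
    let this_unroll_iter := (PySem.List.pyRange 0 filter_height 1).foldl (fun this_unroll_iter fh =>
      let this_height_iter :=
        if PySem.List.pyGetD num_cache_byrow fh 0 ≤ stride then
          (PySem.List.pyRange 0 (PySem.List.pyGetD num_cache_byrow fh 0) 1).foldl
            (fun acc nc => acc ++ [nc + fh * (filter_width - stride)]) []
        else
          (PySem.List.pyRange 0 (PySem.List.pyGetD num_cache_byrow fh 0) 1).foldl
            (fun acc nc => acc ++ [PySem.Int.mod (un + nc) (PySem.List.pyGetD num_cache_byrow fh 0) + fh * (filter_width - stride)]) []
      this_unroll_iter ++ [this_height_iter]) []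
    sequence_list ++ [this_unroll_iter]) []

-- ===== PORT B =====
-- Literal port of Source B: precompute rows = [(n, base)] once, then copy or rotate per unroll step.
def generate_inout_sequence_alt (filter_width : Int) (filter_height : Int) (stride : Int) (num_cache_byrow : List Int) : List (List (List Int)) :=
  let unroll_num := filter_width - stride
  if unroll_num ≤ 0 then []
  else
    let rows : List (Int × List Int) := (PySem.List.pyRange 0 filter_height 1).foldl (fun rows fh =>
      let n := PySem.List.pyGetD num_cache_byrow fh 0
      let off := fh * (filter_width - stride)
      rows ++ [(n, (PySem.List.pyRange 0 n 1).map (fun k => off + k))]) []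
    (PySem.List.pyRange 0 unroll_num 1).foldl (fun out un =>
      let this := rows.foldl (fun this p =>
        this ++ [if p.1 ≤ stride ∨ p.1 ≤ 0 then p.2
                 else PySem.List.slice p.2 (some (PySem.Int.mod un p.1)) none
                      ++ PySem.List.slice p.2 none (some (PySem.Int.mod un p.1))]) []
      out ++ [this]) []

-- ===== PRECONDITION & SPEC =====
-- Pre_ excludes exactly the inputs where Python A raises IndexError: the row loop runs
-- (filter_width - stride > 0) and reads num_cache_byrow[fh] for fh < filter_height beyond the list.
def Pre_generate_inout_sequence (filter_width : Int) (filter_height : Int) (stride : Int) (num_cache_byrow : List Int) : Prop :=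
  filter_width - stride ≤ 0 ∨ filter_height ≤ (num_cache_byrow.length : Int)
instance (filter_width : Int) (filter_height : Int) (stride : Int) (num_cache_byrow : List Int) : Decidable (Pre_generate_inout_sequence filter_width filter_height stride num_cache_byrow) := by unfold Pre_generate_inout_sequence; infer_instance
def pvWitness_generate_inout_sequence : Int × Int × Int × List Int := (3, 2, 1, [1, 3])
def Spec_generate_inout_sequence (filter_width : Int) (filter_height : Int) (stride : Int) (num_cache_byrow : List Int) (out : List (List (List Int))) : Prop := out = generate_inout_sequence_alt filter_width filter_height stride num_cache_byrow
instance (filter_width : Int) (filter_height : Int) (stride : Int) (num_cache_byrow : List Int) (out : List (List (List Int))) : Decidable (Spec_generate_inout_sequence filter_width filter_height stride num_cache_byrow out) := by unfold Spec_generate_inout_sequence; infer_instance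

-- ===== CLAIM (what is proved, stated in full; the proofs are below) =====
def Claim_equal_generate_inout_sequence : Prop := ∀ (filter_width : Int) (filter_height : Int) (stride : Int) (num_cache_byrow : List Int), Dom_generate_inout_sequence filter_width filter_height stride num_cache_byrow → Pre_generate_inout_sequence filter_width filter_height stride num_cache_byrow → Spec_generate_inout_sequence filter_width filter_height stride num_cache_byrow (generate_inout_sequence filter_width filter_height stride num_cache_byrow)

-- ===== LEMMAS AND PROOFS =====

-- Rotation over Nat ranges: the mod-shifted enumeration is drop/take of the base enumeration.
lemma rot_core (N R : Nat) (hR : R < N) (off : Int) :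
    (List.range N).map (fun k : Nat => (((R : Int) + (k : Int)) % (N : Int)) + off)
      = ((List.range N).map (fun k : Nat => off + (k : Int))).drop R
        ++ ((List.range N).map (fun k : Nat => off + (k : Int))).take R := by
  have h1 : List.range N = List.range (N - R) ++ (List.range R).map (fun x => (N - R) + x) := by
    conv_lhs => rw [show N = (N - R) + R from by omega]
    exact List.range_add
  have h2 : List.range N = List.range R ++ (List.range (N - R)).map (fun x => R + x) := by
    conv_lhs => rw [show N = R + (N - R) from by omega]
    exact List.range_add
  rw [← List.map_drop, ← List.map_take]
  rw [show (List.range N).drop R = (List.range (N - R)).map (fun x => R + x) from by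
        rw [h2]; simp]
  rw [show (List.range N).take R = List.range R from by
        rw [h2]; simp]
  conv_lhs => rw [h1]
  simp only [List.map_append, List.map_map]
  congr 1
  · refine List.map_congr_left (fun k hk => ?_)
    have hk' : k < N - R := List.mem_range.mp hk
    have he : ((R : Int) + k) % (N : Int) = (R : Int) + k :=
      Int.emod_eq_of_lt (by positivity) (by omega)
    simp only [Function.comp, he]
    push_cast; ring
  · refine List.map_congr_left (fun j hj => ?_)
    have hj' : j < R := List.mem_range.mp hj
    simp only [Function.comp]
    have h3 : ((R : Int) + ((N - R) + j : Nat)) = (j : Int) + (N : Int) * 1 := by push_cast; omega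
    rw [h3, Int.add_mul_emod_self_left,
        Int.emod_eq_of_lt (by positivity) (by omega)]
    ring

lemma rot_int (un n off : Int) (hn : 0 < n) :
    (PySem.List.pyRange 0 n 1).map (fun nc => PySem.Int.mod (un + nc) n + off)
      = PySem.List.slice ((PySem.List.pyRange 0 n 1).map (fun k => off + k)) (some (PySem.Int.mod un n)) none
        ++ PySem.List.slice ((PySem.List.pyRange 0 n 1).map (fun k => off + k)) none (some (PySem.Int.mod un n)) := by
  have hr0 : 0 ≤ PySem.Int.mod un n := PySem.Int.mod_nonneg un hn
  have hrn : PySem.Int.mod un n < n := PySem.Int.mod_lt un hn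
  have hmod : PySem.Int.mod un n = un % n := PySem.Int.mod_eq_emod_of_pos hn
  have hdiv : un % n + n * (un / n) = un := Int.emod_add_mul_ediv un n
  rw [PySem.List.slice_from _ hr0, PySem.List.slice_to _ hr0]
  rw [PySem.List.pyRange_zero, List.map_map, List.map_map]
  set R := (PySem.Int.mod un n).toNat with hRdef
  have hRN : R < n.toNat := by omega
  calc (List.range n.toNat).map ((fun nc => PySem.Int.mod (un + nc) n + off) ∘ (fun k : Nat => (k : Int)))
      = (List.range n.toNat).map (fun k : Nat => (((R : Int) + k) % (n.toNat : Int)) + off) := by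
        refine List.map_congr_left (fun k _ => ?_)
        simp only [Function.comp]
        rw [show ((n.toNat : Int)) = n from by omega, PySem.Int.mod_eq_emod_of_pos hn]
        congr 1
        rw [show un + (k : Int) = ((un % n) + k) + n * (un / n) from by omega,
            Int.add_mul_emod_self_left]
        congr 1
        omega
    _ = _ := by
        rw [rot_core n.toNat R hRN off]
        rfl

-- ===== VERDICT (by name: the statement is the Claim_ definition above) =====
theorem generate_inout_sequence_spec : Claim_equal_generate_inout_sequence := by
  intro fw fh st ncb _ _
  unfold Spec_generate_inout_sequence generate_inout_sequence generate_inout_sequence_alt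
  by_cases hU : fw - st ≤ 0
  · simp [hU, PySem.List.pyRange_one_eq_nil hU]
  · simp only [if_neg hU, PySem.List.foldl_append_singleton_eq_map, List.nil_append, List.map_map]
    refine List.map_congr_left (fun un _ => ?_)
    refine List.map_congr_left (fun h _ => ?_)
    simp only [Function.comp]
    by_cases h1 : PySem.List.pyGetD ncb h 0 ≤ st
    · simp only [if_pos h1, if_pos (Or.inl h1)]
      exact List.map_congr_left (fun x _ => by ring)
    · by_cases h2 : PySem.List.pyGetD ncb h 0 ≤ 0
      · simp [PySem.List.pyRange_one_eq_nil h2, h2]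
      · simp only [if_neg h1, if_neg (by omega : ¬(PySem.List.pyGetD ncb h 0 ≤ st ∨ PySem.List.pyGetD ncb h 0 ≤ 0))]
        exact rot_int un _ _ (lt_of_not_ge h2)
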